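-- pv_equiv track=rewrite | github.com/aboucher51/adventofcode | 2022/01/main.py | sumInput
-- ===== SOURCE A (Python) =====
-- def sumInput(lines):
--     elves = []
--     runningTotal = 0
--     for number in lines:
--         runningTotal += number
--         if number == 0:
--             elves.append(runningTotal)
--             runningTotal = 0
--     return elves
-- ===== SOURCE B (Python) =====
-- def sumInput(lines):
--     # Recursive: find the first 0, sum the block up to and including it,
--     # recurse on the remainder; a tail with no 0 is discarded.
--     try:
--         i = lines.index(0)
--     except ValueError:
--         return []
--     return [sum(lines[:i + 1])] + sumInput(lines[i + 1:])
-- ===== Notes on version B (the rewrite author's own statement) =====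
-- stated objective: alternative
-- what changed: B is recursive: it locates the first 0 with list.index, sums that zero-terminated slice, and recurses on the remainder (discarding a zero-free tail), instead of A's single iterative running-total loop.
import Mathlib
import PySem

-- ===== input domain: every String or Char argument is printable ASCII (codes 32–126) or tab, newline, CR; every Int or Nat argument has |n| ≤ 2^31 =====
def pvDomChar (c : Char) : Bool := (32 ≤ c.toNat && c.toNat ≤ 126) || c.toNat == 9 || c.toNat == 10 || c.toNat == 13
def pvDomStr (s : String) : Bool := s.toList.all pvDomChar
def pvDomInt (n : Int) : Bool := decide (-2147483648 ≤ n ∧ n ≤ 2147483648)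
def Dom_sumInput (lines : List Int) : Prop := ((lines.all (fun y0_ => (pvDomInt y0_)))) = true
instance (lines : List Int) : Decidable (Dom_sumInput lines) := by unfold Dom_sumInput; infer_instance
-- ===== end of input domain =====

-- B recursively splits the input at the first 0 (summing each zero-terminated
-- slice and discarding a zero-free tail), instead of A's iterative running-total
-- loop (objective: alternative).


-- ===== PORT A =====
def sumInput (lines : List Int) : List Int :=
  (lines.foldl
    (fun (st : List Int × Int) number =>
      let runningTotal := st.2 + number
      if number == 0 then (st.1 ++ [runningTotal], 0) else (st.1, runningTotal))
    ([], 0)).1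

-- ===== PORT B =====
def sumInput_alt (lines : List Int) : List Int :=
  match h : PySem.List.index? lines 0 with
  | none => []
  | some i =>
    ((PySem.List.slice lines none (some ((i : Int) + 1))).foldl (· + ·) 0)
      :: sumInput_alt (PySem.List.slice lines (some ((i : Int) + 1)) none)
termination_by lines.length
decreasing_by
  obtain ⟨hi, -, -⟩ := PySem.List.getElem_of_index?_eq_some h
  have : ((i : Int) + 1) = ((i + 1 : Nat) : Int) := by push_cast; ring
  rw [this, PySem.List.slice_from_natCast]
  simp [List.length_drop]
  omega

-- ===== PRECONDITION & SPEC =====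
def Spec_sumInput (lines : List Int) (out : List Int) : Prop := out = sumInput_alt lines
instance (lines : List Int) (out : List Int) : Decidable (Spec_sumInput lines out) := by unfold Spec_sumInput; infer_instance

-- ===== CLAIM (what is proved, stated in full; the proofs are below) =====
def Claim_equal_sumInput : Prop := ∀ (lines : List Int), Dom_sumInput lines → Spec_sumInput lines (sumInput lines)

-- ===== LEMMAS AND PROOFS =====

-- A's loop step, named for the lemmas (sumInput itself keeps it inline).
def pvStep (st : List Int × Int) (number : Int) : List Int × Int :=
  let runningTotal := st.2 + number
  if number == 0 then (st.1 ++ [runningTotal], 0) else (st.1, runningTotal)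

theorem pvSumInput_eq_foldl (lines : List Int) :
    sumInput lines = (lines.foldl pvStep ([], 0)).1 := rfl

-- The already-appended elves pass through A's loop unchanged.
theorem pvFoldl_acc (l : List Int) : ∀ (elves : List Int) (rt : Int),
    (l.foldl pvStep (elves, rt)).1 = elves ++ (l.foldl pvStep ([], rt)).1 := by
  induction l with
  | nil => intro elves rt; simp
  | cons x tl ih =>
    intro elves rt
    by_cases hx : x = 0
    · subst hx
      simp only [List.foldl_cons, pvStep, BEq.rfl, if_pos]
      rw [ih (elves ++ [rt + 0]) 0]
      simp only [List.nil_append]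
      rw [ih [rt + 0] 0]
      simp
    · simp only [List.foldl_cons, pvStep, beq_iff_eq, hx, if_neg, not_false_iff]
      exact ih elves (rt + x)

-- A zero-free suffix contributes nothing to A's output list.
theorem pvFoldl_nozero (l : List Int) (h : (0 : Int) ∉ l) :
    ∀ (elves : List Int) (rt : Int), (l.foldl pvStep (elves, rt)).1 = elves := by
  induction l with
  | nil => intro elves rt; rfl
  | cons x tl ih =>
    intro elves rt
    have hx : x ≠ 0 := fun hh => h (hh ▸ List.mem_cons_self)
    simp only [List.foldl_cons, pvStep, beq_iff_eq, hx, if_neg, not_false_iff]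
    exact ih (fun hm => h (List.mem_cons_of_mem _ hm)) elves (rt + x)

-- Peeling one zero-terminated block off A's loop.
theorem pvFoldl_block (pre : List Int) (hp : (0 : Int) ∉ pre) (suf : List Int) :
    ∀ (rt : Int), ((pre ++ 0 :: suf).foldl pvStep ([], rt)).1
      = (pre.foldl (· + ·) rt) :: (suf.foldl pvStep ([], 0)).1 := by
  induction pre with
  | nil =>
    intro rt
    simp only [List.nil_append, List.foldl_cons, pvStep, BEq.rfl, if_pos]
    rw [pvFoldl_acc]
    simp
  | cons x tl ih =>
    intro rt
    have hx : x ≠ 0 := fun hh => hp (hh ▸ List.mem_cons_self)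
    simp only [List.cons_append, List.foldl_cons, pvStep, beq_iff_eq, hx, if_neg,
      not_false_iff]
    exact ih (fun hm => hp (List.mem_cons_of_mem _ hm)) (rt + x)

theorem pvMain : ∀ (n : Nat) (lines : List Int), lines.length ≤ n →
    sumInput lines = sumInput_alt lines := by
  intro n
  induction n with
  | zero =>
    intro lines hlen
    have : lines = [] := List.eq_nil_of_length_eq_zero (Nat.le_zero.mp hlen)
    subst this
    simp [sumInput_alt, sumInput, PySem.List.index?_eq_idxOf?]
  | succ n ih =>
    intro lines hlen
    rw [sumInput_alt]
    split
    next h =>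
      have h0 : (0 : Int) ∉ lines := (PySem.List.index?_eq_none_iff lines 0).mp h
      rw [pvSumInput_eq_foldl, pvFoldl_nozero lines h0]
    next i h =>
      obtain ⟨pre, suf, hsplit, hplen, hpre⟩ := (PySem.List.index?_eq_some_iff lines 0 i).mp h
      have hcast : ((i : Int) + 1) = ((i + 1 : Nat) : Int) := by push_cast; ring
      have htake : PySem.List.slice lines none (some ((i : Int) + 1)) = pre ++ [0] := by
        rw [hcast, PySem.List.slice_to_natCast, hsplit, ← hplen]
        rw [show pre ++ (0 : Int) :: suf = (pre ++ [0]) ++ suf from by simp]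
        rw [show pre.length + 1 = (pre ++ [(0 : Int)]).length from by simp]
        exact List.take_left
      have hdrop : PySem.List.slice lines (some ((i : Int) + 1)) none = suf := by
        rw [hcast, PySem.List.slice_from_natCast, hsplit, ← hplen]
        rw [show pre ++ (0 : Int) :: suf = (pre ++ [0]) ++ suf from by simp]
        rw [show pre.length + 1 = (pre ++ [(0 : Int)]).length from by simp]
        exact List.drop_left
      have hsuf : suf.length ≤ n := by
        have := congrArg List.length hsplit
        simp at this
        omega
      rw [htake, hdrop, ← ih suf hsuf]
      rw [pvSumInput_eq_foldl, hsplit, pvFoldl_block pre hpre suf 0]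
      rw [pvSumInput_eq_foldl]
      congr 1
      simp

-- ===== VERDICT (by name: the statement is the Claim_ definition above) =====
theorem sumInput_spec : Claim_equal_sumInput := by
  intro lines _
  exact pvMain lines.length lines le_rfl
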